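-- pv_equiv track=rewrite | github.com/JungeAlexander/cocoscore | cocoscore/tagger/co_occurrence_score.py | load_sentence_score_iterator
-- ===== SOURCE A (Python) =====
-- import collections
--
-- def load_sentence_score_iterator(score_dict):
--     for entity_pair, pmid_paragraph_sentence_dict in score_dict.items():
--         entity_1, entity_2 = entity_pair
--         pmid_to_paragraphs = collections.defaultdict(set)
--         pmid_to_sentences = collections.defaultdict(set)
--         for pmid_paragraph_sentence, _ in pmid_paragraph_sentence_dict.items():
--             pmid, paragraph, sentence = pmid_paragraph_sentence
--             pmid_to_sentences[pmid].add((paragraph, sentence))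
--             pmid_to_paragraphs[pmid].add(paragraph)
--         for pmid in pmid_to_sentences:
--             yield pmid, entity_1, entity_2, pmid_to_sentences[pmid], pmid_to_paragraphs[pmid]
-- ===== SOURCE B (Python) =====
-- def load_sentence_score_iterator(score_dict):
--     for (entity_1, entity_2), pmid_paragraph_sentence_dict in score_dict.items():
--         keys = list(pmid_paragraph_sentence_dict)
--         for pmid in dict.fromkeys(p for p, _, _ in keys):
--             yield (pmid, entity_1, entity_2,
--                    {(par, sen) for p, par, sen in keys if p == pmid},
--                    {par for p, par, sen in keys if p == pmid})
-- ===== Notes on version B (the rewrite author's own statement) =====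
-- stated objective: simpler
-- what changed: B drops the two incrementally-built defaultdicts entirely: it takes the ordered dedup of pmids and builds each sentence/paragraph set with a per-pmid comprehension over the key list.
import Mathlib
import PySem

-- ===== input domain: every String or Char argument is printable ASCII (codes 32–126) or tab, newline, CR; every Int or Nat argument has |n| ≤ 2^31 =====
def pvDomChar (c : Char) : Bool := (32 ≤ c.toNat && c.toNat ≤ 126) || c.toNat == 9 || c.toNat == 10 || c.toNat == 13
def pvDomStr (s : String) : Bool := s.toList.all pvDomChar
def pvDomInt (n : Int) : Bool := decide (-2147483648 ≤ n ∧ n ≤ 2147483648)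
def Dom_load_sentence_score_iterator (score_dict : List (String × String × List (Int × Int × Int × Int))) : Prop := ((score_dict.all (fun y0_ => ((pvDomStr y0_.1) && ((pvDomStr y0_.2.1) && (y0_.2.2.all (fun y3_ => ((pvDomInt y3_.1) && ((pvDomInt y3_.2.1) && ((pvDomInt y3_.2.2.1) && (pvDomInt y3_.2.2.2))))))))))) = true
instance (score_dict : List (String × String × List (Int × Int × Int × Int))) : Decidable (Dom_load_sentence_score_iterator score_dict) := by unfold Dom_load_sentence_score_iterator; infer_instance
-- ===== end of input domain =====

-- B is simpler: it drops A's two incrementally-built defaultdicts and instead takes the ordered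
-- dedup of pmids and builds each sentence/paragraph set by a per-pmid comprehension over the keys.

-- ===== PORT A =====
def load_sentence_score_iterator (score_dict : List (String × String × List (Int × Int × Int × Int))) : List (Int × String × String × (List (Int × Int)) × List Int) :=
  score_dict.foldl (fun out ep =>
    let entity_1 := ep.1
    let entity_2 := ep.2.1
    -- (pmid_to_paragraphs, pmid_to_sentences): defaultdict(set) = Dict.modify with empty default
    let ds := ep.2.2.foldl
      (fun (ds : PySem.Dict Int (PySem.Set Int) × PySem.Dict Int (PySem.Set (Int × Int))) t =>
        (ds.1.modify t.1 PySem.Set.empty (fun s => PySem.Set.add s t.2.1),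
         ds.2.modify t.1 PySem.Set.empty (fun s => PySem.Set.add s (t.2.1, t.2.2.1))))
      (PySem.Dict.empty, PySem.Dict.empty)
    -- for pmid in pmid_to_sentences: yield pmid, e1, e2, sentences[pmid], paragraphs[pmid]
    out ++ ds.2.keys.map (fun pmid =>
      (pmid, entity_1, entity_2, ds.2.getD pmid PySem.Set.empty, ds.1.getD pmid PySem.Set.empty)))
  []

-- ===== PORT B =====
def load_sentence_score_iterator_alt (score_dict : List (String × String × List (Int × Int × Int × Int))) : List (Int × String × String × (List (Int × Int)) × List Int) :=
  score_dict.flatMap (fun ep =>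
    let keys := ep.2.2
    -- for pmid in dict.fromkeys(p for p, _, _ in keys): yield with two set comprehensions
    (PySem.List.dedup (keys.map (·.1))).map (fun pmid =>
      (pmid, ep.1, ep.2.1,
       PySem.Set.ofList ((keys.filter (fun t => t.1 == pmid)).map (fun t => (t.2.1, t.2.2.1))),
       PySem.Set.ofList ((keys.filter (fun t => t.1 == pmid)).map (fun t => t.2.1)))))

-- ===== PRECONDITION & SPEC =====
def Spec_load_sentence_score_iterator (score_dict : List (String × String × List (Int × Int × Int × Int))) (out : List (Int × String × String × (List (Int × Int)) × List Int)) : Prop := out = load_sentence_score_iterator_alt score_dict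
instance (score_dict : List (String × String × List (Int × Int × Int × Int))) (out : List (Int × String × String × (List (Int × Int)) × List Int)) : Decidable (Spec_load_sentence_score_iterator score_dict out) := by
  unfold Spec_load_sentence_score_iterator
  exact @instDecidableEqList _ (fun a b => instDecidableEqProd a b) out _

-- ===== CLAIM (what is proved, stated in full; the proofs are below) =====
def Claim_equal_load_sentence_score_iterator : Prop := ∀ (score_dict : List (String × String × List (Int × Int × Int × Int))), Dom_load_sentence_score_iterator score_dict → Spec_load_sentence_score_iterator score_dict (load_sentence_score_iterator score_dict)

-- ===== LEMMAS AND PROOFS =====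

-- proof-side names for the per-entity-pair group of each port
def pairDicts (items : List (Int × Int × Int × Int)) : PySem.Dict Int (PySem.Set Int) × PySem.Dict Int (PySem.Set (Int × Int)) :=
  items.foldl
    (fun (ds : PySem.Dict Int (PySem.Set Int) × PySem.Dict Int (PySem.Set (Int × Int))) t =>
      (ds.1.modify t.1 PySem.Set.empty (fun s => PySem.Set.add s t.2.1),
       ds.2.modify t.1 PySem.Set.empty (fun s => PySem.Set.add s (t.2.1, t.2.2.1))))
    (PySem.Dict.empty, PySem.Dict.empty)

def groupA (ep : String × String × List (Int × Int × Int × Int)) : List (Int × String × String × (List (Int × Int)) × List Int) :=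
  (pairDicts ep.2.2).2.keys.map (fun pmid =>
    (pmid, ep.1, ep.2.1, (pairDicts ep.2.2).2.getD pmid PySem.Set.empty, (pairDicts ep.2.2).1.getD pmid PySem.Set.empty))

def groupB (ep : String × String × List (Int × Int × Int × Int)) : List (Int × String × String × (List (Int × Int)) × List Int) :=
  (PySem.List.dedup (ep.2.2.map (·.1))).map (fun pmid =>
    (pmid, ep.1, ep.2.1,
     PySem.Set.ofList ((ep.2.2.filter (fun t => t.1 == pmid)).map (fun t => (t.2.1, t.2.2.1))),
     PySem.Set.ofList ((ep.2.2.filter (fun t => t.1 == pmid)).map (fun t => t.2.1))))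

-- a defaultdict(set)-building loop, looked up afterwards: d[k] holds the values of the
-- items whose key is k, in first-occurrence order
theorem getD_foldl_modify_setAdd {κ α β : Type} [BEq κ] [LawfulBEq κ] [DecidableEq κ] [BEq α]
    (key : β → κ) (val : β → α) (l : List β) (d : PySem.Dict κ (PySem.Set α)) (k : κ) :
    (l.foldl (fun d x => d.modify (key x) PySem.Set.empty (fun s => PySem.Set.add s (val x))) d).getD k PySem.Set.empty
      = PySem.Set.update (d.getD k PySem.Set.empty) ((l.filter (fun x => key x == k)).map val) := by
  induction l generalizing d with
  | nil => simp [PySem.Set.update_nil]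
  | cons x xs ih =>
    rw [List.foldl_cons, ih]
    by_cases h : key x = k
    · simp [h, PySem.Set.update_cons]
    · have h' : ¬ k = key x := fun hh => h hh.symm
      have hb : (key x == k) = false := by simp [h]
      simp [hb, PySem.Dict.getD_modify, h']

theorem pairDicts_eq (items : List (Int × Int × Int × Int)) :
    pairDicts items =
      (items.foldl (fun d t => d.modify t.1 PySem.Set.empty (fun s => PySem.Set.add s t.2.1)) PySem.Dict.empty,
       items.foldl (fun d t => d.modify t.1 PySem.Set.empty (fun s => PySem.Set.add s (t.2.1, t.2.2.1))) PySem.Dict.empty) := by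
  unfold pairDicts
  exact PySem.List.foldl_prod_mk
    (f := fun d t => PySem.Dict.modify d t.1 PySem.Set.empty (fun s => PySem.Set.add s t.2.1))
    (g := fun d t => PySem.Dict.modify d t.1 PySem.Set.empty (fun s => PySem.Set.add s (t.2.1, t.2.2.1)))
    items PySem.Dict.empty PySem.Dict.empty

-- one entity-pair group of A equals the corresponding group of B
theorem group_eq (ep : String × String × List (Int × Int × Int × Int)) : groupA ep = groupB ep := by
  unfold groupA groupB
  rw [pairDicts_eq]
  rw [PySem.Dict.keys_foldl_modify_key ep.2.2 (fun t => t.1) PySem.Set.empty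
    (fun _ t s => PySem.Set.add s (t.2.1, t.2.2.1)) PySem.Dict.empty]
  rw [PySem.List.dedup_eq_ofList]
  have hk : (PySem.Dict.empty : PySem.Dict Int (PySem.Set (Int × Int))).keys = [] := rfl
  rw [hk, PySem.Set.update_nil_left]
  apply List.map_congr_left
  intro pmid _
  rw [getD_foldl_modify_setAdd (fun t => t.1) (fun t => (t.2.1, t.2.2.1)) ep.2.2 PySem.Dict.empty pmid,
      getD_foldl_modify_setAdd (fun t => t.1) (fun t => t.2.1) ep.2.2 PySem.Dict.empty pmid]
  simp [PySem.Dict.getD_empty, PySem.Set.update_nil_left]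

-- ===== VERDICT (by name: the statement is the Claim_ definition above) =====
theorem load_sentence_score_iterator_spec : Claim_equal_load_sentence_score_iterator := by
  intro score_dict _
  show load_sentence_score_iterator score_dict = load_sentence_score_iterator_alt score_dict
  have h1 : load_sentence_score_iterator score_dict = [] ++ score_dict.flatMap groupA :=
    PySem.List.foldl_append_eq_flatMap groupA score_dict []
  have h2 : load_sentence_score_iterator_alt score_dict = score_dict.flatMap groupB := rfl
  rw [h1, h2, List.nil_append, show groupA = groupB from funext group_eq]
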